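-- pv_equiv track=rewrite | github.com/Assael1/Yahtzi | computer_version.py | common_to_end
-- ===== SOURCE A (Python) =====
-- def common_to_end(dices):
--     common = 0
--     number = -1
--     for i in range(1, 7):
--         counter = 0
--         for j in dices:
--             if i == j[0]:
--                 counter += 1
--         if common <= counter:
--             common = counter
--             number = i
--     return number
-- ===== SOURCE B (Python) =====
-- def common_to_end(dices):
--     counts = {}
--     for j in dices:
--         counts[j[0]] = counts.get(j[0], 0) + 1
--     return max(range(1, 7), key=lambda i: (counts.get(i, 0), i))
-- ===== Notes on version B (the rewrite author's own statement) =====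
-- stated objective: idiomatic
-- what changed: A rescans the whole dice list once per face (six passes, nested loops with a running best); B builds one frequency table of the dice heads in a single pass and then picks max(range(1,7), key=(count, face)), the tie-to-larger-face selection as one key-based max.
import Mathlib
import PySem

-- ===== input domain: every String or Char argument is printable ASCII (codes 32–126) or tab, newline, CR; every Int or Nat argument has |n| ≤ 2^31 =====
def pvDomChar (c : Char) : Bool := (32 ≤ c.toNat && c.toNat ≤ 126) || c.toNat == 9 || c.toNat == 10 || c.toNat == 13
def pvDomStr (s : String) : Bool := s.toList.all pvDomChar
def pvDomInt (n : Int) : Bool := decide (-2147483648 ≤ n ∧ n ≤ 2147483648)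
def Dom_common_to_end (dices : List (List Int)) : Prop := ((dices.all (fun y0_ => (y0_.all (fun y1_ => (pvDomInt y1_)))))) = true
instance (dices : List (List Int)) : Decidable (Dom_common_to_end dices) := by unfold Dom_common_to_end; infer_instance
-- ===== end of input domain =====

-- B builds one frequency table over the dice heads and takes max(range(1,7), key=(count, face));
-- A's per-face rescan of `dices` disappears (objective: idiomatic).

-- ===== PORT A =====
def common_to_end (dices : List (List Int)) : Int :=
  ((PySem.List.pyRange 1 7 1).foldl
    (fun (st : Int × Int) i =>
      let counter : Int :=
        dices.foldl (fun c j => if i = (PySem.List.pyGet? j 0).getD 0 then c + 1 else c) 0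
      if st.1 ≤ counter then (counter, i) else st)
    (0, -1)).2

-- ===== PORT B =====
def common_to_end_alt (dices : List (List Int)) : Int :=
  let counts : PySem.Dict Int Int :=
    dices.foldl
      (fun d j =>
        let h := (PySem.List.pyGet? j 0).getD 0
        d.insert h (d.getD h 0 + 1))
      PySem.Dict.empty
  -- max over the nonempty range(1,7): the `none` branch is unreachable, default -1 is arbitrary
  (PySem.List.max2? (PySem.List.pyRange 1 7 1) (fun i => counts.getD i 0) (fun i => i)).getD (-1)

-- ===== PRECONDITION & SPEC =====
-- Pre_ excludes inputs with an empty inner list, on which A's j[0] raises IndexError (B raises there too).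
def Pre_common_to_end (dices : List (List Int)) : Prop := ∀ j ∈ dices, j ≠ []
instance (dices : List (List Int)) : Decidable (Pre_common_to_end dices) := by unfold Pre_common_to_end; infer_instance
def pvWitness_common_to_end : List (List Int) := [[3, 1], [3], [5, 2]]

def Spec_common_to_end (dices : List (List Int)) (out : Int) : Prop := out = common_to_end_alt dices
instance (dices : List (List Int)) (out : Int) : Decidable (Spec_common_to_end dices out) := by unfold Spec_common_to_end; infer_instance

-- ===== CLAIM (what is proved, stated in full; the proofs are below) =====
def Claim_equal_common_to_end : Prop := ∀ (dices : List (List Int)), Dom_common_to_end dices → Pre_common_to_end dices → Spec_common_to_end dices (common_to_end dices)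

-- ===== LEMMAS AND PROOFS =====

-- A's selection step and B's (max2?) selection step, abstracted over the count function
def pvStepA (c : Int → Int) (st : Int × Int) (i : Int) : Int × Int :=
  if st.1 ≤ c i then (c i, i) else st

def pvStepB (c : Int → Int) (acc : Option Int) (x : Int) : Option Int :=
  match acc with
  | none => some x
  | some m => if (decide (c m < c x) || !decide (c x < c m) && decide (m < x)) = true then some x else some m

theorem pvMax2_eq_foldl (c : Int → Int) (xs : List Int) :
    PySem.List.max2? xs (fun i => c i) (fun i => i) = xs.foldl (pvStepB c) none := by
  unfold PySem.List.max2? pvStepB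
  congr 1
  funext acc x
  cases acc <;> rfl

-- counting fold = List.count of the heads
theorem pvCountFold (i : Int) : ∀ (xs : List Int) (acc : Int),
    xs.foldl (fun cnt x => if i = x then cnt + 1 else cnt) acc = acc + (xs.count i : Int) := by
  intro xs
  induction xs with
  | nil => intro acc; simp
  | cons x t ih =>
    intro acc
    by_cases h : i = x
    · subst h
      simp [ih, List.foldl_cons]
      ring
    · simp [List.foldl_cons, if_neg h, ih, Ne.symm h]

-- the core invariant: once both folds carry the same pivot b (with A also carrying c b),
-- over a strictly increasing list of faces all above b they stay in lock step
theorem pvRel (c : Int → Int) : ∀ (l : List Int) (b : Int),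
    (∀ x ∈ l, b < x) → l.Pairwise (· < ·) →
    l.foldl (pvStepB c) (some b) = some (l.foldl (pvStepA c) (c b, b)).2 ∧
    (l.foldl (pvStepA c) (c b, b)).1 = c (l.foldl (pvStepA c) (c b, b)).2 := by
  intro l
  induction l with
  | nil => intro b _ _; simp
  | cons i t ih =>
    intro b hb hp
    have hbi : b < i := hb i (by simp)
    have hti : ∀ x ∈ t, i < x := by
      intro x hx; exact (List.pairwise_cons.mp hp).1 x hx
    have hpt : t.Pairwise (· < ·) := (List.pairwise_cons.mp hp).2
    by_cases h : c b ≤ c i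
    · have hA : pvStepA c (c b, b) i = (c i, i) := by simp [pvStepA, h]
      have hB : pvStepB c (some b) i = some i := by
        simp only [pvStepB]
        have : (decide (c b < c i) || !decide (c i < c b) && decide (b < i)) = true := by
          rcases lt_or_eq_of_le h with h' | h'
          · simp [h']
          · simp [h', hbi]
        simp [this]
      rw [List.foldl_cons, List.foldl_cons, hA, hB]
      exact ih i hti hpt
    · have hA : pvStepA c (c b, b) i = (c b, b) := by simp [pvStepA, h]
      have hB : pvStepB c (some b) i = some b := by
        push Not at h
        simp [pvStepB, not_lt_of_gt h, h]
      rw [List.foldl_cons, List.foldl_cons, hA, hB]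
      exact ih b (fun x hx => hb x (by simp [hx])) hpt

-- ===== VERDICT (by name: the statement is the Claim_ definition above) =====
theorem common_to_end_spec : Claim_equal_common_to_end := by
  intro dices _ _
  unfold Spec_common_to_end common_to_end common_to_end_alt
  set hd : List Int → Int := fun j => (PySem.List.pyGet? j 0).getD 0 with hhd
  set c : Int → Int := fun i => ((dices.map hd).count i : Int) with hc
  have hcnonneg : ∀ i, 0 ≤ c i := by intro i; simp [hc]
  -- A's inner fold is c i
  have hAfun : (fun (st : Int × Int) i =>
      let counter : Int :=
        dices.foldl (fun cnt j => if i = (PySem.List.pyGet? j 0).getD 0 then cnt + 1 else cnt) 0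
      if st.1 ≤ counter then (counter, i) else st) = pvStepA c := by
    funext st i
    have : dices.foldl (fun cnt j => if i = hd j then cnt + 1 else cnt) 0 = c i := by
      have h0 := pvCountFold i (dices.map hd) 0
      rw [List.foldl_map] at h0
      exact h0.trans (by simp [hc])
    simp only [pvStepA, hhd] at *
    simp [this]
  -- B's counts lookup is c i
  have hcounts : (fun i => (dices.foldl
      (fun d j =>
        let h := (PySem.List.pyGet? j 0).getD 0
        d.insert h (d.getD h 0 + 1))
      PySem.Dict.empty).getD i 0) = c := by
    funext i
    rw [show (fun (d : PySem.Dict Int Int) (j : List Int) =>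
        let h := (PySem.List.pyGet? j 0).getD 0
        d.insert h (d.getD h 0 + 1)) = (fun d j => d.insert (hd j) (d.getD (hd j) 0 + 1)) from rfl]
    have h0 := PySem.Dict.getD_counter (dices.map hd) i
    rw [← PySem.Dict.foldl_insert_getD_add_one_eq_counter, List.foldl_map] at h0
    exact h0.trans (by simp [hc])
  simp only [hAfun, hcounts, pvMax2_eq_foldl]
  -- unroll the first face: both folds reach pivot 1
  have hrange : PySem.List.pyRange 1 7 1 = [1, 2, 3, 4, 5, 6] := by decide
  rw [hrange]
  have h1A : pvStepA c (0, -1) 1 = (c 1, 1) := by simp [pvStepA, hcnonneg 1]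
  have h1B : pvStepB c none 1 = some 1 := rfl
  rw [show ([1, 2, 3, 4, 5, 6] : List Int).foldl (pvStepA c) (0, -1)
        = ([2, 3, 4, 5, 6] : List Int).foldl (pvStepA c) (pvStepA c (0, -1) 1) from rfl,
      show ([1, 2, 3, 4, 5, 6] : List Int).foldl (pvStepB c) none
        = ([2, 3, 4, 5, 6] : List Int).foldl (pvStepB c) (pvStepB c none 1) from rfl,
      h1A, h1B]
  have := pvRel c [2, 3, 4, 5, 6] 1 (by decide) (by decide)
  rw [this.1]
  rfl
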